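-- pv_equiv track=rewrite | github.com/rsupak/daily-programmer | daily-py/group_by_actor.py | groupByActor
-- ===== SOURCE A (Python) =====
-- def groupByActor(input):
--     movie_dict = {}
--     for items in input:
--         movie_dict[items[0]] = items[1:]
--
--     actors = set()
--     for items in movie_dict.values():
--         for person in items:
--             actors.add(person)
--
--     full_list = []
--     for actor in actors:
--         movie_list = [actor]
--         for movie in movie_dict.keys():
--             if actor in movie_dict[movie]:
--                 movie_list.append(movie)
--         if len(movie_list) > 2:
--             full_list.append(movie_list)
--     return sorted(full_list)
-- ===== SOURCE B (Python) =====
-- def groupByActor(input):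
--     # Build movie -> cast once, then a single-pass inverted index actor -> movies.
--     movie_dict = {}
--     for items in input:
--         movie_dict[items[0]] = items[1:]
--
--     index = {}
--     for movie, cast in movie_dict.items():
--         for actor in dict.fromkeys(cast):
--             index.setdefault(actor, []).append(movie)
--
--     return sorted([actor] + movies
--                   for actor, movies in index.items() if len(movies) >= 2)
-- ===== Notes on version B (the rewrite author's own statement) =====
-- stated objective: faster
-- what changed: A scans every movie's full cast once per actor (nested actors x movies x cast passes); B builds an inverted index actor->movies in one pass over the casts and emits the filtered groups directly.
-- outside the precondition, e.g. on groupByActor([[]]): A raises IndexError, B raises IndexError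
import Mathlib
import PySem

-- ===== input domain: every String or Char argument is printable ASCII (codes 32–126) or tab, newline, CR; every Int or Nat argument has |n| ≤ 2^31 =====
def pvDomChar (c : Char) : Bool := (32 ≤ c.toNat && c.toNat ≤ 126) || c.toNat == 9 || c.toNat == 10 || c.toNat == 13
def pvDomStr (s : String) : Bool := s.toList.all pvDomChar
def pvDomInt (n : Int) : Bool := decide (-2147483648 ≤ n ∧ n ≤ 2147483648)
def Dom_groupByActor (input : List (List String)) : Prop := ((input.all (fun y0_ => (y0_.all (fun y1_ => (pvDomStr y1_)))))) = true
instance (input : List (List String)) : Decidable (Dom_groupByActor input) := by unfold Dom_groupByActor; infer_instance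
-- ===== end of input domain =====

-- B replaces A's per-actor scan over all movies by a single-pass inverted index (actor -> movies); return value only, no mutation.

-- ===== PORT A =====
-- shared first loop of both Pythons: movie_dict[items[0]] = items[1:]
-- (items[0] raises IndexError on an empty row — those inputs are excluded by Pre_groupByActor; the [] branch is unreachable there)
def pvMovieDict (input : List (List String)) : PySem.Dict String (List String) :=
  input.foldl (fun d items =>
    match items with
    | [] => d
    | k :: rest => d.insert k rest) PySem.Dict.empty

def groupByActor (input : List (List String)) : List (List String) :=
  let movie_dict := pvMovieDict input
  let actors : PySem.Set String :=
    movie_dict.values.foldl (fun s items => items.foldl PySem.Set.add s) PySem.Set.empty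
  let full_list : List (List String) :=
    actors.foldl (fun acc actor =>
      let movie_list : List String :=
        movie_dict.keys.foldl (fun ml movie =>
          if (movie_dict.getD movie []).contains actor then ml ++ [movie] else ml) [actor]
      if 2 < movie_list.length then acc ++ [movie_list] else acc) []
  PySem.List.sorted full_list (fun x => x) false

-- ===== PORT B =====
def groupByActor_alt (input : List (List String)) : List (List String) :=
  let movie_dict := pvMovieDict input
  let index : PySem.Dict String (List String) :=
    movie_dict.items.foldl (fun d p =>
      (PySem.List.dedup p.2).foldl (fun d actor => d.modify actor [] (· ++ [p.1])) d)
      PySem.Dict.empty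
  PySem.List.sorted
    ((index.items.filter (fun p => 2 ≤ p.2.length)).map (fun p => [p.1] ++ p.2))
    (fun x => x) false

-- ===== PRECONDITION & SPEC =====
-- Pre_ excludes inputs containing an empty row, on which A's 'items[0]' raises IndexError.
def Pre_groupByActor (input : List (List String)) : Prop := [] ∉ input
instance (input : List (List String)) : Decidable (Pre_groupByActor input) := by unfold Pre_groupByActor; infer_instance

def pvWitness_groupByActor : List (List String) :=
  [["m1", "a", "b"], ["m2", "b", "a", "a"], ["m3", "c"]]

def Spec_groupByActor (input : List (List String)) (out : List (List String)) : Prop := out = groupByActor_alt input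
instance (input : List (List String)) (out : List (List String)) : Decidable (Spec_groupByActor input out) := by unfold Spec_groupByActor; infer_instance

-- ===== CLAIM (what is proved, stated in full; the proofs are below) =====
def Claim_equal_groupByActor : Prop := ∀ (input : List (List String)), Dom_groupByActor input → Pre_groupByActor input → Spec_groupByActor input (groupByActor input)

-- ===== LEMMAS AND PROOFS =====

lemma pv_movieDict_eq (input : List (List String)) (hpre : [] ∉ input) :
    pvMovieDict input = input.foldl (fun d x => d.insert (x.headD "") x.tail) PySem.Dict.empty := by
  unfold pvMovieDict
  apply PySem.List.foldl_congr_mem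
  intro acc x hx
  cases x with
  | nil => exact absurd hx hpre
  | cons k r => rfl

lemma pv_nodup (input : List (List String)) (hpre : [] ∉ input) :
    (pvMovieDict input).keys.Nodup := by
  rw [pv_movieDict_eq input hpre]
  exact PySem.Dict.nodup_keys_foldl_insert_key _ _ _ _ PySem.Dict.nodup_keys_empty

lemma pv_update_append (s : PySem.Set String) (a b : List String) :
    PySem.Set.update s (a ++ b) = PySem.Set.update (PySem.Set.update s a) b := by
  show (a ++ b).foldl PySem.Set.add s = _
  rw [List.foldl_append]; rfl

lemma pv_ofList_append_singleton (xs : List String) (x : String) :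
    PySem.Set.ofList (xs ++ [x]) = PySem.Set.add (PySem.Set.ofList xs) x := by
  rw [PySem.Set.ofList_eq_foldl, PySem.Set.ofList_eq_foldl, List.foldl_append]
  rfl

lemma pv_update_dedup (xs : List String) (s : PySem.Set String) :
    PySem.Set.update s (PySem.List.dedup xs) = PySem.Set.update s xs := by
  induction xs using List.reverseRecOn with
  | nil => rfl
  | append_singleton xs x ih =>
    rw [PySem.List.dedup_eq_ofList] at ih ⊢
    rw [pv_ofList_append_singleton, pv_update_append s xs [x]]
    have hsx : PySem.Set.update (PySem.Set.update s xs) [x]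
        = PySem.Set.add (PySem.Set.update s xs) x := rfl
    rw [hsx]
    by_cases hx : x ∈ PySem.Set.ofList xs
    · have hxu : x ∈ PySem.Set.update s xs :=
        (PySem.Set.mem_update s xs x).mpr (Or.inr ((PySem.Set.mem_ofList xs x).mp hx))
      rw [PySem.Set.add_of_mem hx, ih, PySem.Set.add_of_mem hxu]
    · rw [PySem.Set.add_of_not_mem hx, pv_update_append, ih]
      rfl

lemma pv_upd_flatten (ls : List (List String)) (s : PySem.Set String) :
    ls.foldl (fun s xs => xs.foldl PySem.Set.add s) s = PySem.Set.update s ls.flatten := by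
  induction ls generalizing s with
  | nil => rfl
  | cons x ls ih => rw [List.foldl_cons, ih, List.flatten_cons, pv_update_append]; rfl

lemma pv_update_flatMap_dedup (I : List (String × List String)) (s : PySem.Set String) :
    PySem.Set.update s (I.flatMap (fun p => PySem.List.dedup p.2))
      = PySem.Set.update s (I.flatMap (fun p => p.2)) := by
  induction I generalizing s with
  | nil => rfl
  | cons p I ih => rw [List.flatMap_cons, List.flatMap_cons, pv_update_append, pv_update_append,
      pv_update_dedup, ih]

lemma pv_nested_modify (I : List (String × List String)) (d : PySem.Dict String (List String)) :
    I.foldl (fun d p => (PySem.List.dedup p.2).foldl (fun d a => d.modify a [] (· ++ [p.1])) d) d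
      = (I.flatMap (fun p => (PySem.List.dedup p.2).map (fun a => (a, p.1)))).foldl
          (fun d q => d.modify q.1 [] (· ++ [q.2])) d := by
  induction I generalizing d with
  | nil => rfl
  | cons p I ih => rw [List.foldl_cons, List.flatMap_cons, List.foldl_append, List.foldl_map, ih]

lemma pv_getD_chunk (a m : String) (cast : List String) :
    (((PySem.List.dedup cast).map (fun x => (x, m))).filter (fun q => q.1 == a)).map (·.2)
      = if cast.contains a then [m] else [] := by
  rw [List.filter_map, List.map_map]
  have h1 : (PySem.List.dedup cast).filter ((fun q => q.1 == a) ∘ (fun x => (x, m)))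
      = if a ∈ cast then [a] else [] := by
    show (PySem.List.dedup cast).filter (· == a) = _
    rw [List.filter_beq]
    by_cases h : a ∈ cast
    · rw [List.count_eq_one_of_mem (PySem.List.nodup_dedup cast)
        ((PySem.List.mem_dedup cast a).mpr h)]
      simp [h]
    · rw [List.count_eq_zero_of_not_mem (fun hc => h ((PySem.List.mem_dedup cast a).mp hc))]
      simp [h]
  rw [h1]
  by_cases h : a ∈ cast <;> simp [h]

lemma pv_flatMap_ite {α β : Type} (I : List α) (q : α → Bool) (f : α → β) :
    I.flatMap (fun p => if q p then [f p] else []) = (I.filter q).map f := by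
  induction I with
  | nil => rfl
  | cons p I ih =>
    rw [List.flatMap_cons, List.filter_cons, ih]
    by_cases h : q p <;> simp [h]

lemma pv_movie_list (d : PySem.Dict String (List String)) (hnd : d.keys.Nodup) (a : String) :
    d.keys.foldl (fun ml movie => if (d.getD movie []).contains a then ml ++ [movie] else ml) [a]
      = a :: (d.items.filter (fun p => p.2.contains a)).map (·.1) := by
  rw [PySem.List.foldl_append_if_eq_filter]
  show [a] ++ _ = _
  have hk : d.keys = d.items.map (·.1) := rfl
  rw [hk, List.filter_map,
    List.filter_congr (fun p (hp : p ∈ d.items) => by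
      show ((d.getD p.1 []).contains a) = (p.2.contains a)
      rw [PySem.Dict.getD_of_mem_items d (k := p.1) (v := p.2)
        (by cases p with | mk k v => exact hp) hnd []])]
  rfl

-- B's index: its lookups are exactly A's per-actor movie lists, and its keys are A's actor set
lemma pv_index_getD (d : PySem.Dict String (List String)) (a : String) :
    ((d.items.flatMap (fun p => (PySem.List.dedup p.2).map (fun x => (x, p.1)))).foldl
        (fun dd q => dd.modify q.1 [] (· ++ [q.2])) PySem.Dict.empty).getD a []
      = (d.items.filter (fun p => p.2.contains a)).map (·.1) := by
  rw [PySem.Dict.getD_foldl_modify_append]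
  rw [show (PySem.Dict.empty : PySem.Dict String (List String)).getD a [] = [] from rfl]
  rw [List.filter_flatMap, List.map_flatMap]
  rw [show (fun p : String × List String =>
        (((PySem.List.dedup p.2).map (fun x => (x, p.1))).filter (fun q => q.1 == a)).map (·.2))
      = (fun p : String × List String => if p.2.contains a then [p.1] else []) from
    funext (fun p => pv_getD_chunk a p.1 p.2)]
  rw [pv_flatMap_ite d.items (fun p => p.2.contains a) (·.1)]
  rfl

lemma pv_index_keys (d : PySem.Dict String (List String)) :
    ((d.items.flatMap (fun p => (PySem.List.dedup p.2).map (fun x => (x, p.1)))).foldl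
        (fun dd q => dd.modify q.1 [] (· ++ [q.2])) PySem.Dict.empty).keys
      = PySem.Set.update [] (d.items.flatMap (fun p => p.2)) := by
  rw [PySem.Dict.keys_foldl_modify_key _ Prod.fst [] (fun _ q => (· ++ [q.2])) PySem.Dict.empty]
  rw [show (PySem.Dict.empty : PySem.Dict String (List String)).keys = [] from rfl]
  rw [List.map_flatMap]
  rw [show (fun p : String × List String => ((PySem.List.dedup p.2).map (fun x => (x, p.1))).map Prod.fst)
      = (fun p : String × List String => PySem.List.dedup p.2) from
    funext (fun p => by rw [List.map_map]; exact List.map_id' (PySem.List.dedup p.2))]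
  exact pv_update_flatMap_dedup d.items []

-- ===== VERDICT (by name: the statement is the Claim_ definition above) =====
theorem groupByActor_spec : Claim_equal_groupByActor := by
  intro input _ hpre
  unfold Spec_groupByActor groupByActor groupByActor_alt
  have hnd : (pvMovieDict input).keys.Nodup := pv_nodup input hpre
  set d := pvMovieDict input with hd
  dsimp only
  rw [pv_nested_modify d.items PySem.Dict.empty]
  set index := (d.items.flatMap (fun p => (PySem.List.dedup p.2).map (fun x => (x, p.1)))).foldl
      (fun dd q => dd.modify q.1 [] (· ++ [q.2])) PySem.Dict.empty with hIdx
  have hkeys : index.keys = PySem.Set.update [] (d.items.flatMap (fun p => p.2)) :=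
    pv_index_keys d
  have hndi : index.keys.Nodup := by
    rw [hIdx]
    exact PySem.Dict.nodup_keys_foldl_modify_key _ Prod.fst [] (fun _ q => (· ++ [q.2]))
      PySem.Dict.empty PySem.Dict.nodup_keys_empty
  -- A's actor set is the same list as B's index.keys (first occurrences, in order)
  have hA : d.values.foldl (fun s items => items.foldl PySem.Set.add s) PySem.Set.empty
      = index.keys := by
    rw [pv_upd_flatten, hkeys]
    show PySem.Set.update [] (d.items.map (·.2)).flatten = _
    rw [← List.flatMap_def]
  rw [hA]
  -- B's index items, written over index.keys
  have hitems : index.items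
      = index.keys.map (fun k => (k, (d.items.filter (fun p => p.2.contains k)).map (·.1))) := by
    rw [PySem.Dict.items_eq_map_keys index hndi []]
    exact List.map_congr_left (fun k _ => by rw [hIdx, pv_index_getD d k])
  rw [hitems]
  -- A's inner loop over all movies, rewritten to the same per-actor movie list
  rw [show (fun (acc : List (List String)) (actor : String) =>
        let movie_list := d.keys.foldl
          (fun ml movie => if (d.getD movie []).contains actor = true then ml ++ [movie] else ml)
          [actor]
        if 2 < movie_list.length then acc ++ [movie_list] else acc)
      = (fun acc actor =>
          if (fun a => decide (2 ≤ ((d.items.filter (fun p => p.2.contains a)).map (·.1) : List String).length)) actor = true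
          then acc ++ [(fun a => a :: (d.items.filter (fun p => p.2.contains a)).map (·.1)) actor]
          else acc) from funext (fun acc => funext (fun actor => by
        show (if 2 < (d.keys.foldl _ [actor]).length then acc ++ [d.keys.foldl _ [actor]] else acc) = _
        rw [pv_movie_list d hnd actor]
        simp))]
  rw [PySem.List.foldl_append_if]
  rw [List.filter_map, List.map_map]
  rfl
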